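-- pv_equiv track=rewrite | github.com/acmert/ntt-based-polmul | baseline/poly.py | SchoolbookModPolMul_PWC
-- ===== SOURCE A (Python) =====
-- def SchoolbookModPolMul_PWC(A, B, q):
--     C = [0] * (2 * len(A))
--     D = [0] * (len(A))
--     for indexA, elemA in enumerate(A):
--         for indexB, elemB in enumerate(B):
--             C[indexA + indexB] = (C[indexA + indexB] + elemA * elemB) % q
--
--     for i in range(len(A)):
--         D[i] = (C[i] + C[i + len(A)]) % q
--     return D
-- ===== SOURCE B (Python) =====
-- def SchoolbookModPolMul_PWC(A, B, q):
--     # Fold B modulo x^n - 1 first, then one cyclic convolution with modular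
--     # indexing; no 2n-sized buffer and no second reduction pass.
--     n = len(A)
--     if n == 0:
--         return []
--     Bf = [0] * n
--     for k, b in enumerate(B):
--         Bf[k % n] = (Bf[k % n] + b) % q
--     return [sum(a * Bf[(i - j) % n] for j, a in enumerate(A)) % q for i in range(n)]
-- ===== Notes on version B (the rewrite author's own statement) =====
-- stated objective: alternative
-- what changed: B first folds B modulo x^n-1 into one length-n vector, then computes each output coefficient as a single cyclic dot product with modular indexing, instead of A's 2n-sized linear-convolution buffer with per-step reduction followed by a separate wrap-around pass.
import Mathlib
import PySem

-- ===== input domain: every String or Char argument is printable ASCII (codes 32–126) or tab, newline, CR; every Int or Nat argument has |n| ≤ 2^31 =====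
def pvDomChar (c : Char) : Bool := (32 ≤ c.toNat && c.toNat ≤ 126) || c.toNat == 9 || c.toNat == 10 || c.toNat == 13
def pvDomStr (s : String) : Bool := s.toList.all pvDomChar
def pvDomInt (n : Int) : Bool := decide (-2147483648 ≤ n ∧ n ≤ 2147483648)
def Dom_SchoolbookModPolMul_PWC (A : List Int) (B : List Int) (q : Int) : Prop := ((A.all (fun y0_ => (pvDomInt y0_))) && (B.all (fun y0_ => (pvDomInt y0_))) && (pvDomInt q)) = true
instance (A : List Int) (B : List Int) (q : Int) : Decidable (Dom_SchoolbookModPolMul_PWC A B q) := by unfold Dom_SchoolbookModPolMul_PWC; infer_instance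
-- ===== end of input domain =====

-- B folds B modulo x^n - 1 into one length-n vector first and then computes each output
-- coefficient as a single cyclic dot product with modular indexing, instead of A's 2n-sized
-- linear-convolution buffer plus a separate wrap-around pass (alternative decomposition, same asymptotic cost).

-- ===== PORT A =====
def SchoolbookModPolMul_PWC (A : List Int) (B : List Int) (q : Int) : List Int :=
  let C0 : List Int := List.replicate (2 * A.length) 0
  let C : List Int := (PySem.List.enumerate A).foldl (fun C p =>
      (PySem.List.enumerate B).foldl (fun C r =>
        C.set (p.1 + r.1).toNat (PySem.Int.mod (C.getD (p.1 + r.1).toNat 0 + p.2 * r.2) q)) C) C0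
  (List.range A.length).foldl (fun D i =>
      D.set i (PySem.Int.mod (C.getD i 0 + C.getD (i + A.length) 0) q))
    (List.replicate A.length 0)

-- ===== PORT B =====
def SchoolbookModPolMul_PWC_alt (A : List Int) (B : List Int) (q : Int) : List Int :=
  let n := A.length
  if n = 0 then []
  else
    let Bf : List Int := (PySem.List.enumerate B).foldl (fun Bf p =>
        Bf.set (PySem.Int.mod p.1 (n : Int)).toNat
          (PySem.Int.mod (Bf.getD (PySem.Int.mod p.1 (n : Int)).toNat 0 + p.2) q))
      (List.replicate n 0)
    (List.range n).map (fun (i : Nat) =>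
      PySem.Int.mod
        ((PySem.List.enumerate A).foldl
          (fun s p => s + p.2 * Bf.getD (PySem.Int.mod ((i : Int) - p.1) (n : Int)).toNat 0) 0) q)

-- ===== PRECONDITION & SPEC =====
-- Pre_ excludes exactly the inputs where A raises: q = 0 (ZeroDivisionError, whenever A ≠ [])
-- and len(B) > len(A) + 1 (IndexError past A's 2n-sized buffer, whenever A ≠ []).
def Pre_SchoolbookModPolMul_PWC (A : List Int) (B : List Int) (q : Int) : Prop :=
  A = [] ∨ (q ≠ 0 ∧ B.length ≤ A.length + 1)
instance (A : List Int) (B : List Int) (q : Int) : Decidable (Pre_SchoolbookModPolMul_PWC A B q) := by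
  unfold Pre_SchoolbookModPolMul_PWC; infer_instance

def pvWitness_SchoolbookModPolMul_PWC : List Int × List Int × Int := ([1, 2, 3], [4, 5, 6], 7)

def Spec_SchoolbookModPolMul_PWC (A : List Int) (B : List Int) (q : Int) (out : List Int) : Prop := out = SchoolbookModPolMul_PWC_alt A B q
instance (A : List Int) (B : List Int) (q : Int) (out : List Int) : Decidable (Spec_SchoolbookModPolMul_PWC A B q out) := by unfold Spec_SchoolbookModPolMul_PWC; infer_instance

-- ===== CLAIM (what is proved, stated in full; the proofs are below) =====
def Claim_equal_SchoolbookModPolMul_PWC : Prop := ∀ (A : List Int) (B : List Int) (q : Int), Dom_SchoolbookModPolMul_PWC A B q → Pre_SchoolbookModPolMul_PWC A B q → Spec_SchoolbookModPolMul_PWC A B q (SchoolbookModPolMul_PWC A B q)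

-- ===== LEMMAS AND PROOFS =====

def pvStep (q : Int) (C : List Int) (u : Nat × Int) : List Int :=
  C.set u.1 (PySem.Int.mod (C.getD u.1 0 + u.2) q)

def pvSumAt (t : Nat) (ups : List (Nat × Int)) : Int :=
  ((ups.filter (fun u => u.1 == t)).map (·.2)).sum

def pvCoef (A B : List Int) (t : Nat) : Int :=
  ∑ j ∈ Finset.range A.length, ∑ k ∈ Finset.range B.length,
    if j + k = t then A.getD j 0 * B.getD k 0 else 0

def pvSumB (B : List Int) (n r : Nat) : Int :=
  ∑ k ∈ Finset.range B.length, if k % n = r then B.getD k 0 else 0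

lemma pv_mod_mod_add (a b q : Int) :
    PySem.Int.mod (PySem.Int.mod a q + b) q = PySem.Int.mod (a + b) q := by
  simp [PySem.Int.mod]

lemma pv_mod_add_mul (a k q : Int) :
    PySem.Int.mod (a + q * k) q = PySem.Int.mod a q := by
  simp [PySem.Int.mod, Int.mul_comm]

lemma pv_getD_set_self (C : List Int) (t : Nat) (v : Int) (ht : t < C.length) :
    (C.set t v).getD t 0 = v := by
  rw [List.getD_eq_getElem _ _ (by simpa using ht)]
  simp

lemma pv_getD_lt (C : List Int) (t : Nat) (ht : t < C.length) : C.getD t 0 = C[t] :=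
  List.getD_eq_getElem _ _ ht

lemma pv_step_length (q : Int) (C : List Int) (u : Nat × Int) :
    (pvStep q C u).length = C.length := by
  simp [pvStep]

lemma pv_acc (q : Int) (ups : List (Nat × Int)) :
    ∀ (C : List Int) (t : Nat) (s : Int), t < C.length → C.getD t 0 = PySem.Int.mod s q →
      (ups.foldl (pvStep q) C).getD t 0 = PySem.Int.mod (s + pvSumAt t ups) q := by
  induction ups with
  | nil => intro C t s ht hs; simpa [pvSumAt] using hs
  | cons u us ih =>
    intro C t s ht hs
    by_cases hu : u.1 = t
    · have hs' : C[t] = PySem.Int.mod s q := (pv_getD_lt _ _ ht).symm.trans hs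
      have h1 : (pvStep q C u).getD t 0 = PySem.Int.mod (s + u.2) q := by
        rw [pvStep, hu, pv_getD_set_self _ _ _ ht, pv_getD_lt _ _ ht]
        exact (congrArg (fun x => PySem.Int.mod (x + u.2) q) hs').trans (pv_mod_mod_add s u.2 q)
      have := ih (pvStep q C u) t (s + u.2) (by simp [pv_step_length]; omega) h1
      simpa [pvSumAt, hu, add_assoc] using this
    · have h1 : (pvStep q C u).getD t 0 = C.getD t 0 := by
        simp [pvStep, List.getD_eq_getElem?_getD, List.getElem?_set_ne hu]
      have := ih (pvStep q C u) t s (by simp [pv_step_length]; omega) (h1.trans hs)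
      simpa [pvSumAt, hu] using this

lemma pv_sumAt_cons (t : Nat) (u : Nat × Int) (us : List (Nat × Int)) :
    pvSumAt t (u :: us) = (if u.1 = t then u.2 else 0) + pvSumAt t us := by
  by_cases h : u.1 = t <;> simp [pvSumAt, h]

lemma pv_sumAt_append (t : Nat) (l1 l2 : List (Nat × Int)) :
    pvSumAt t (l1 ++ l2) = pvSumAt t l1 + pvSumAt t l2 := by
  simp [pvSumAt, List.filter_append]

lemma pv_sumAt_map_row (B : List Int) (t ia : Nat) (a : Int) : ∀ s : Nat,
    pvSumAt t ((PySem.List.enumerate B (s : Int)).map (fun r => (((ia : Int) + r.1).toNat, a * r.2)))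
      = ∑ k ∈ Finset.range B.length, if ia + (s + k) = t then a * B.getD k 0 else 0 := by
  induction B with
  | nil => intro s; simp [pvSumAt, PySem.List.enumerate_nil]
  | cons b B' ih =>
    intro s
    have hcast : ((s : Int) + 1) = ((s + 1 : Nat) : Int) := by push_cast; ring
    rw [PySem.List.enumerate_cons, List.map_cons, pv_sumAt_cons, hcast, ih (s + 1)]
    simp only [List.length_cons]
    rw [Finset.sum_range_succ']
    simp only [List.getD_cons_zero, List.getD_cons_succ]
    rw [add_comm]
    refine congrArg₂ (· + ·) ?_ ?_
    · exact Finset.sum_congr rfl fun k _ => if_congr (by omega) rfl rfl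
    · show (if ((ia : Int) + (s : Int)).toNat = t then a * b else 0)
        = (if ia + (s + 0) = t then a * b else 0)
      exact if_congr (by omega) rfl rfl

lemma pv_sumAt_flat (B : List Int) (t : Nat) (A : List Int) : ∀ s : Nat,
    pvSumAt t ((PySem.List.enumerate A (s : Int)).flatMap
        (fun p => (PySem.List.enumerate B).map (fun r => ((p.1 + r.1).toNat, p.2 * r.2))))
      = ∑ j ∈ Finset.range A.length, ∑ k ∈ Finset.range B.length,
          if (s + j) + k = t then A.getD j 0 * B.getD k 0 else 0 := by
  induction A with
  | nil => intro s; simp [pvSumAt, PySem.List.enumerate_nil]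
  | cons a A' ih =>
    intro s
    have hcast : ((s : Int) + 1) = ((s + 1 : Nat) : Int) := by push_cast; ring
    rw [PySem.List.enumerate_cons, List.flatMap_cons, pv_sumAt_append, hcast, ih (s + 1)]
    simp only [List.length_cons]
    rw [Finset.sum_range_succ']
    simp only [List.getD_cons_zero, List.getD_cons_succ]
    rw [add_comm]
    refine congrArg₂ (· + ·) ?_ ?_
    · exact Finset.sum_congr rfl fun j _ =>
        Finset.sum_congr rfl fun k _ => if_congr (by omega) rfl rfl
    · have hrow : pvSumAt t ((PySem.List.enumerate B (0 : Int)).map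
          (fun r => (((s : Int) + r.1).toNat, a * r.2)))
          = ∑ k ∈ Finset.range B.length, if s + (0 + k) = t then a * B.getD k 0 else 0 := by
        simpa only [Nat.cast_zero] using pv_sumAt_map_row B t s a 0
      exact hrow.trans (Finset.sum_congr rfl fun k _ => if_congr (by omega) rfl rfl)

def pvUpsA (A B : List Int) : List (Nat × Int) :=
  (PySem.List.enumerate A).flatMap
    (fun p => (PySem.List.enumerate B).map (fun r => ((p.1 + r.1).toNat, p.2 * r.2)))

lemma pv_nested_eq (A B : List Int) (q : Int) (C0 : List Int) :
    (PySem.List.enumerate A).foldl (fun C p =>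
        (PySem.List.enumerate B).foldl (fun C r =>
          C.set (p.1 + r.1).toNat (PySem.Int.mod (C.getD (p.1 + r.1).toNat 0 + p.2 * r.2) q)) C) C0
      = (pvUpsA A B).foldl (pvStep q) C0 := by
  rw [pvUpsA, List.foldl_flatMap]
  induction PySem.List.enumerate A generalizing C0 with
  | nil => rfl
  | cons p ps ih =>
    simp only [List.foldl_cons]
    have hinner : (PySem.List.enumerate B).foldl (fun C r =>
          C.set (p.1 + r.1).toNat (PySem.Int.mod (C.getD (p.1 + r.1).toNat 0 + p.2 * r.2) q)) C0
        = ((PySem.List.enumerate B).map (fun r => ((p.1 + r.1).toNat, p.2 * r.2))).foldl (pvStep q) C0 := by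
      rw [List.foldl_map]
      rfl
    rw [hinner, ih]

lemma pv_set_cons_zero (x : Int) (ys : List Int) (v : Int) : (x :: ys).set 0 v = v :: ys := rfl

lemma pv_foldl_set_range (f : Nat → Int) : ∀ (m t : Nat) (c : Int),
    (List.range m).foldl (fun D i => D.set i (f i)) (List.replicate (m + t) c)
      = (List.range m).map f ++ List.replicate t c := by
  intro m
  induction m with
  | zero => intro t c; simp
  | succ m ih =>
    intro t c
    rw [List.range_succ, List.foldl_append, show m + 1 + t = m + (t + 1) from by omega, ih (t + 1) c]
    simp only [List.foldl_cons, List.foldl_nil, List.map_append]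
    rw [List.set_append_right _ _ (by simp), List.length_map, List.length_range, Nat.sub_self,
      List.replicate_succ, pv_set_cons_zero]
    simp

lemma pv_mod_zero (q : Int) : PySem.Int.mod 0 q = 0 := by simp [PySem.Int.mod]

lemma pv_mod_add_mod (a b q : Int) :
    PySem.Int.mod (a + PySem.Int.mod b q) q = PySem.Int.mod (a + b) q := by
  simp [PySem.Int.mod]

lemma pv_sumAt_upsA (A B : List Int) (t : Nat) :
    pvSumAt t (pvUpsA A B) = pvCoef A B t := by
  have h := pv_sumAt_flat B t A 0
  simp only [Nat.cast_zero, zero_add] at h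
  rw [pvUpsA, pvCoef]
  exact h

lemma pv_C_char (A B : List Int) (q : Int) (t : Nat) (ht : t < 2 * A.length) :
    ((pvUpsA A B).foldl (pvStep q) (List.replicate (2 * A.length) 0)).getD t 0
      = PySem.Int.mod (pvCoef A B t) q := by
  have h := pv_acc q (pvUpsA A B) (List.replicate (2 * A.length) 0) t 0
    (by simpa using ht) (by simp [pv_mod_zero])
  rw [zero_add, pv_sumAt_upsA] at h
  exact h

lemma pv_A_char (A B : List Int) (q : Int) :
    SchoolbookModPolMul_PWC A B q
      = (List.range A.length).map (fun i =>
          PySem.Int.mod (pvCoef A B i + pvCoef A B (i + A.length)) q) := by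
  rw [SchoolbookModPolMul_PWC]
  rw [pv_nested_eq]
  have hrep : List.replicate A.length (0 : Int) = List.replicate (A.length + 0) 0 := by simp
  rw [hrep, pv_foldl_set_range
    (fun i => PySem.Int.mod
      (((pvUpsA A B).foldl (pvStep q) (List.replicate (2 * A.length) 0)).getD i 0 +
       ((pvUpsA A B).foldl (pvStep q) (List.replicate (2 * A.length) 0)).getD (i + A.length) 0) q)
    A.length 0]
  rw [List.replicate_zero, List.append_nil]
  apply List.map_congr_left
  intro i hi
  rw [List.mem_range] at hi
  rw [pv_C_char A B q i (by omega), pv_C_char A B q (i + A.length) (by omega)]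
  rw [pv_mod_add_mod, pv_mod_mod_add]

def pvUpsB (n : Nat) (B : List Int) : List (Nat × Int) :=
  (PySem.List.enumerate B).map (fun p => ((PySem.Int.mod p.1 (n : Int)).toNat, p.2))

lemma pv_Bf_eq (n : Nat) (B : List Int) (q : Int) (Bf0 : List Int) :
    (PySem.List.enumerate B).foldl (fun Bf p =>
        Bf.set (PySem.Int.mod p.1 (n : Int)).toNat
          (PySem.Int.mod (Bf.getD (PySem.Int.mod p.1 (n : Int)).toNat 0 + p.2) q)) Bf0
      = (pvUpsB n B).foldl (pvStep q) Bf0 := by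
  rw [pvUpsB, List.foldl_map]
  rfl

lemma pv_sumAt_upsB (B : List Int) (n t : Nat) : ∀ s : Nat,
    pvSumAt t ((PySem.List.enumerate B (s : Int)).map
        (fun p => ((PySem.Int.mod p.1 (n : Int)).toNat, p.2)))
      = ∑ k ∈ Finset.range B.length, if (s + k) % n = t then B.getD k 0 else 0 := by
  induction B with
  | nil => intro s; simp [pvSumAt, PySem.List.enumerate_nil]
  | cons b B' ih =>
    intro s
    have hcast : ((s : Int) + 1) = ((s + 1 : Nat) : Int) := by push_cast; ring
    rw [PySem.List.enumerate_cons, List.map_cons, pv_sumAt_cons, hcast, ih (s + 1)]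
    simp only [List.length_cons]
    rw [Finset.sum_range_succ']
    simp only [List.getD_cons_zero, List.getD_cons_succ]
    rw [add_comm]
    refine congrArg₂ (· + ·) ?_ ?_
    · exact Finset.sum_congr rfl fun k _ =>
        if_congr (by rw [show s + 1 + k = s + (k + 1) from by omega]) rfl rfl
    · show (if (PySem.Int.mod (s : Int) (n : Int)).toNat = t then b else 0)
        = (if (s + 0) % n = t then b else 0)
      rw [PySem.Int.mod_natCast]
      exact if_congr (by rw [Int.toNat_natCast, Nat.add_zero]) rfl rfl

lemma pv_Bf_char (B : List Int) (n : Nat) (q : Int) (r : Nat) (hr : r < n) :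
    ((pvUpsB n B).foldl (pvStep q) (List.replicate n 0)).getD r 0
      = PySem.Int.mod (pvSumB B n r) q := by
  have h := pv_acc q (pvUpsB n B) (List.replicate n 0) r 0
    (by simpa using hr) (by simp [pv_mod_zero])
  rw [zero_add] at h
  rw [h]
  congr 1
  have h2 := pv_sumAt_upsB B n r 0
  simp only [Nat.cast_zero, zero_add] at h2
  rw [pvUpsB, pvSumB]
  exact h2

lemma pv_foldl_sum (g : Int → Int → Int) (A : List Int) : ∀ (s : Nat) (c : Int),
    (PySem.List.enumerate A (s : Int)).foldl (fun acc p => acc + g p.1 p.2) c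
      = c + ∑ j ∈ Finset.range A.length, g ((s + j : Nat) : Int) (A.getD j 0) := by
  induction A with
  | nil => intro s c; simp [PySem.List.enumerate_nil]
  | cons a A' ih =>
    intro s c
    have hcast : ((s : Int) + 1) = ((s + 1 : Nat) : Int) := by push_cast; ring
    rw [PySem.List.enumerate_cons, List.foldl_cons, hcast, ih (s + 1)]
    simp only [List.length_cons]
    rw [Finset.sum_range_succ']
    simp only [List.getD_cons_zero, List.getD_cons_succ]
    have h1 : ∀ j, g ((s + 1 + j : Nat) : Int) (A'.getD j 0) = g ((s + (j + 1) : Nat) : Int) (A'.getD j 0) := by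
      intro j
      exact congrArg (fun x => g x (A'.getD j 0)) (by omega)
    rw [Finset.sum_congr rfl (fun j _ => h1 j)]
    simp only [Nat.add_zero]
    ring

lemma pv_mod_sum_pull (F : Finset ℕ) (a x : ℕ → Int) (q : Int) :
    PySem.Int.mod (∑ j ∈ F, a j * PySem.Int.mod (x j) q) q
      = PySem.Int.mod (∑ j ∈ F, a j * x j) q := by
  have hx : ∀ j, a j * PySem.Int.mod (x j) q
      = a j * x j + q * (-(a j * PySem.Int.floordiv (x j) q)) := by
    intro j
    have h := PySem.Int.floordiv_mul_add_mod (x j) q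
    have hm : PySem.Int.mod (x j) q = x j - PySem.Int.floordiv (x j) q * q := by linarith
    rw [hm]; ring
  rw [Finset.sum_congr rfl (fun j _ => hx j), Finset.sum_add_distrib, ← Finset.mul_sum,
    pv_mod_add_mul]

lemma pv_core (A B : List Int) (i : Nat) (hi : i < A.length) (hB : B.length ≤ A.length + 1) :
    ∑ j ∈ Finset.range A.length,
        A.getD j 0 * pvSumB B A.length
          ((PySem.Int.mod ((i : Nat) - (j : Nat) : Int) (A.length : Int)).toNat)
      = pvCoef A B i + pvCoef A B (i + A.length) := by
  rw [pvCoef, pvCoef, ← Finset.sum_add_distrib]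
  apply Finset.sum_congr rfl
  intro j hj
  rw [Finset.mem_range] at hj
  rw [pvSumB, Finset.mul_sum, ← Finset.sum_add_distrib]
  apply Finset.sum_congr rfl
  intro k hk
  rw [Finset.mem_range] at hk
  have hn0 : (0 : Int) < (A.length : Int) := by exact_mod_cast Nat.pos_of_ne_zero (by omega)
  rw [PySem.Int.mod_eq_emod_of_pos hn0]
  by_cases hji : j ≤ i
  · have he : ((i : Int) - (j : Int)) % (A.length : Int) = (i : Int) - (j : Int) :=
      Int.emod_eq_of_lt (by omega) (by omega)
    rw [he, show ((i : Int) - (j : Int)).toNat = i - j from by omega]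
    rcases Nat.lt_or_ge k A.length with hk2 | hk2
    · rw [Nat.mod_eq_of_lt hk2]
      split_ifs <;> omega
    · have hkn : k = A.length := by omega
      rw [hkn, Nat.mod_self]
      split_ifs <;> omega
  · have he : ((i : Int) - (j : Int)) % (A.length : Int) = (i : Int) - (j : Int) + (A.length : Int) := by
      have h1 : ((i : Int) - (j : Int)) % (A.length : Int)
          = ((i : Int) - (j : Int) + (A.length : Int) * 1) % (A.length : Int) :=
        (Int.add_mul_emod_self_left _ _ _).symm
      rw [h1, mul_one]
      exact Int.emod_eq_of_lt (by omega) (by omega)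
    rw [he, show ((i : Int) - (j : Int) + (A.length : Int)).toNat = i + A.length - j from by omega]
    rcases Nat.lt_or_ge k A.length with hk2 | hk2
    · rw [Nat.mod_eq_of_lt hk2]
      split_ifs <;> omega
    · have hkn : k = A.length := by omega
      rw [hkn, Nat.mod_self]
      split_ifs <;> omega

lemma pv_foldl_sum' (A : List Int) (h : Int → Int) :
    (PySem.List.enumerate A).foldl (fun s p => s + p.2 * h p.1) 0
      = ∑ j ∈ Finset.range A.length, A.getD j 0 * h ((j : Nat) : Int) := by
  have hg := pv_foldl_sum (fun x y => y * h x) A 0 0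
  simpa using hg

lemma pv_B_char (A B : List Int) (q : Int) (hA : A ≠ []) (hB : B.length ≤ A.length + 1) :
    SchoolbookModPolMul_PWC_alt A B q
      = (List.range A.length).map (fun i =>
          PySem.Int.mod (pvCoef A B i + pvCoef A B (i + A.length)) q) := by
  have hn : A.length ≠ 0 := fun h => hA (List.eq_nil_of_length_eq_zero h)
  rw [SchoolbookModPolMul_PWC_alt]
  simp only [if_neg hn, pv_Bf_eq]
  apply List.map_congr_left
  intro i hi
  rw [List.mem_range] at hi
  have hidx : ∀ j : Nat,
      (PySem.Int.mod ((i : Int) - (j : Int)) (A.length : Int)).toNat < A.length := by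
    intro j
    have hb : (0 : Int) < (A.length : Int) := by exact_mod_cast Nat.pos_of_ne_zero hn
    have h1 := PySem.Int.mod_nonneg ((i : Int) - (j : Int)) hb
    have h2 := PySem.Int.mod_lt ((i : Int) - (j : Int)) hb
    omega
  calc PySem.Int.mod ((PySem.List.enumerate A).foldl
        (fun s p => s + p.2 *
          ((pvUpsB A.length B).foldl (pvStep q) (List.replicate A.length 0)).getD
            (PySem.Int.mod ((i : Int) - p.1) (A.length : Int)).toNat 0) 0) q
      = PySem.Int.mod (∑ j ∈ Finset.range A.length, A.getD j 0 *
          ((pvUpsB A.length B).foldl (pvStep q) (List.replicate A.length 0)).getD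
            (PySem.Int.mod ((i : Int) - ((j : Nat) : Int)) (A.length : Int)).toNat 0) q := by
        exact congrArg (fun z => PySem.Int.mod z q)
          (pv_foldl_sum' A (fun x =>
            ((pvUpsB A.length B).foldl (pvStep q) (List.replicate A.length 0)).getD
              (PySem.Int.mod ((i : Int) - x) (A.length : Int)).toNat 0))
    _ = PySem.Int.mod (∑ j ∈ Finset.range A.length, A.getD j 0 *
          PySem.Int.mod (pvSumB B A.length
            (PySem.Int.mod ((i : Int) - ((j : Nat) : Int)) (A.length : Int)).toNat) q) q := by
        exact congrArg (fun z => PySem.Int.mod z q)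
          (Finset.sum_congr rfl (fun j _ => by rw [pv_Bf_char B A.length q _ (hidx j)]))
    _ = PySem.Int.mod (∑ j ∈ Finset.range A.length, A.getD j 0 *
          pvSumB B A.length
            (PySem.Int.mod ((i : Int) - ((j : Nat) : Int)) (A.length : Int)).toNat) q := by
        exact pv_mod_sum_pull (Finset.range A.length) _ _ q
    _ = PySem.Int.mod (pvCoef A B i + pvCoef A B (i + A.length)) q := by
        rw [pv_core A B i hi hB]


theorem pv_main (A B : List Int) (q : Int)
    (hpre : A = [] ∨ (q ≠ 0 ∧ B.length ≤ A.length + 1)) :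
    SchoolbookModPolMul_PWC A B q = SchoolbookModPolMul_PWC_alt A B q := by
  rcases hpre with hA | ⟨hq, hB⟩
  · subst hA
    rfl
  · by_cases hA : A = []
    · subst hA; rfl
    · rw [pv_A_char, pv_B_char A B q hA hB]


-- ===== VERDICT (by name: the statement is the Claim_ definition above) =====
theorem SchoolbookModPolMul_PWC_spec : Claim_equal_SchoolbookModPolMul_PWC := by
  intro A B q _ hpre
  exact pv_main A B q hpre
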